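-- pv_equiv track=rewrite | github.com/MinsangKong/DailyProblem | 06-11/2-2.py | get_dp_r
-- ===== SOURCE A (Python) =====
-- def get_dp_r(n, nums):
--     dp = [0] * n
--     for i in range(n - 1, -1, -1):
--         dp[i] = nums[i]
--         if i == n - 1:
--             continue
--         if dp[i] < dp[i + 1] + nums[i]:
--             dp[i] = dp[i + 1] + nums[i]
--     return dp
-- ===== SOURCE B (Python) =====
-- def get_dp_r(n, nums):
--     if n <= 0:
--         return []
--     # prefix sums: prefix[k] = nums[0] + ... + nums[k-1]
--     prefix = [0]
--     for k in range(n):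
--         prefix.append(prefix[-1] + nums[k])
--     # walk backwards keeping m = max(prefix[i+1..n]); dp[i] = m - prefix[i]
--     m = prefix[n]
--     rev = []
--     for i in range(n - 1, -1, -1):
--         if prefix[i + 1] > m:
--             m = prefix[i + 1]
--         rev.append(m - prefix[i])
--     return rev[::-1]
-- ===== Notes on version B (the rewrite author's own statement) =====
-- stated objective: alternative
-- what changed: Replaces the in-place backward DP over a preallocated array (dp[i] = max(nums[i], dp[i+1]+nums[i])) by a prefix-sum formulation: one forward pass builds prefix sums, then a backward pass maintains the running maximum m of prefix[i+1..n] and emits dp[i] = m - prefix[i], reversing the collected entries at the end.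
import Mathlib
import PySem

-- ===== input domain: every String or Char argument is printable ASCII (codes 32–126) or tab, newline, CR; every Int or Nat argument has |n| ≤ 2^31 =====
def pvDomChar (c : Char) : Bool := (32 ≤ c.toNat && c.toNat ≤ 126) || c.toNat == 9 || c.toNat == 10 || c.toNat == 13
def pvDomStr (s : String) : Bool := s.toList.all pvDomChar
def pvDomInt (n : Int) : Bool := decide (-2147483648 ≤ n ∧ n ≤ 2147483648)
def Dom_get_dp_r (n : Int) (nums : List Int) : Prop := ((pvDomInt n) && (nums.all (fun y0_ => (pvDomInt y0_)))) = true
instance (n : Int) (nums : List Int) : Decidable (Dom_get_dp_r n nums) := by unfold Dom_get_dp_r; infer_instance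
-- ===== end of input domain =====

-- B trades A's in-place backward max-DP over a preallocated array for a prefix-sum pass plus a backward suffix-max pass building the result by prepending (alternative decomposition; equal return values).

-- ===== PORT A =====
-- dp = [0]*n; for i in range(n-1,-1,-1): dp[i]=nums[i]; if i==n-1: continue; if dp[i]<dp[i+1]+nums[i]: dp[i]=dp[i+1]+nums[i]
def get_dp_r (n : Int) (nums : List Int) : List Int :=
  (PySem.List.pyRange (n - 1) (-1) (-1)).foldl
    (fun dp i =>
      let dp1 := PySem.List.pySetD dp i (PySem.List.pyGetD nums i 0)
      if i == n - 1 then dp1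
      else
        if PySem.List.pyGetD dp1 i 0 < PySem.List.pyGetD dp1 (i + 1) 0 + PySem.List.pyGetD nums i 0 then
          PySem.List.pySetD dp1 i (PySem.List.pyGetD dp1 (i + 1) 0 + PySem.List.pyGetD nums i 0)
        else dp1)
    (List.replicate n.toNat 0)

-- ===== PORT B =====
-- prefix sums forward, then backward pass keeping m = max(prefix[i+1..n]), appending dp[i] = m - prefix[i] and reversing at the end
def get_dp_r_alt (n : Int) (nums : List Int) : List Int :=
  if n ≤ 0 then []
  else
    let pfx := (PySem.List.pyRange 0 n 1).foldl
      (fun P k => P ++ [PySem.List.pyGetD P (-1) 0 + PySem.List.pyGetD nums k 0]) [0]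
    let st := (PySem.List.pyRange (n - 1) (-1) (-1)).foldl
      (fun (st : Int × List Int) i =>
        let m := if PySem.List.pyGetD pfx (i + 1) 0 > st.1 then PySem.List.pyGetD pfx (i + 1) 0 else st.1
        (m, st.2 ++ [m - PySem.List.pyGetD pfx i 0]))
      (PySem.List.pyGetD pfx n 0, [])
    (PySem.List.slice? st.2 none none (-1)).getD []

-- ===== PRECONDITION & SPEC =====
-- A raises IndexError (nums[i]) exactly when n > len(nums); those inputs are excluded. Every n ≤ len(nums), including n ≤ 0, is admitted.
def Pre_get_dp_r (n : Int) (nums : List Int) : Prop := n ≤ (nums.length : Int)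
instance (n : Int) (nums : List Int) : Decidable (Pre_get_dp_r n nums) := by unfold Pre_get_dp_r; infer_instance
def pvWitness_get_dp_r : Int × List Int := (3, [1, -2, 3])

def Spec_get_dp_r (n : Int) (nums : List Int) (out : List Int) : Prop := out = get_dp_r_alt n nums
instance (n : Int) (nums : List Int) (out : List Int) : Decidable (Spec_get_dp_r n nums out) := by unfold Spec_get_dp_r; infer_instance

-- ===== CLAIM (what is proved, stated in full; the proofs are below) =====
def Claim_equal_get_dp_r : Prop := ∀ (n : Int) (nums : List Int), Dom_get_dp_r n nums → Pre_get_dp_r n nums → Spec_get_dp_r n nums (get_dp_r n nums)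

-- ===== LEMMAS AND PROOFS =====

-- reference value: the backward max-sum DP of a list, computed structurally
def fAux : List Int → List Int
  | [] => []
  | x :: t =>
    match fAux t with
    | [] => [x]
    | y :: r => (max x (x + y)) :: y :: r

theorem repl_set (j : Nat) (x v : Int) (L : List Int) :
    (List.replicate j (0:Int) ++ x :: L).set j v = List.replicate j 0 ++ v :: L := by
  induction j with
  | zero => simp
  | succ j ih => simp [List.replicate_succ, ih]

theorem repl_getD (j : Nat) (x d : Int) (L : List Int) :
    (List.replicate j (0:Int) ++ x :: L).getD j d = x := by
  induction j with
  | zero => simp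
  | succ j ih => simp [List.replicate_succ, List.getD]

theorem repl_getD_succ (j : Nat) (x d : Int) (L : List Int) :
    (List.replicate j (0:Int) ++ x :: L).getD (j+1) d = L.getD 0 d := by
  induction j with
  | zero => simp [List.getD]
  | succ j ih => simpa [List.replicate_succ, List.getD] using ih

theorem take_sum_succ (nums : List Int) (k : Nat) (h : k < nums.length) :
    (nums.take (k+1)).sum = (nums.take k).sum + nums.getD k 0 := by
  rw [List.take_add_one, List.sum_append]
  simp [List.getElem?_eq_getElem h, List.getD]

theorem pl_getD (nums : List Int) (N k : Nat) (h : k ≤ N) :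
    ((List.range (N+1)).map (fun t => (nums.take t).sum)).getD k 0 = (nums.take k).sum := by
  rw [List.getD, List.getElem?_map, List.getElem?_range (by omega)]
  rfl

-- A's backward loop, started after the first N-j iterations, finishes the DP of nums.take N
theorem invA (nums : List Int) (N : Nat) (hN : N ≤ nums.length) :
    ∀ (j : Nat), j ≤ N →
    (PySem.List.pyRange ((j:Int) - 1) (-1) (-1)).foldl
      (fun dp i =>
        let dp1 := PySem.List.pySetD dp i (PySem.List.pyGetD nums i 0)
        if i == (N:Int) - 1 then dp1
        else
          if PySem.List.pyGetD dp1 i 0 < PySem.List.pyGetD dp1 (i + 1) 0 + PySem.List.pyGetD nums i 0 then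
            PySem.List.pySetD dp1 i (PySem.List.pyGetD dp1 (i + 1) 0 + PySem.List.pyGetD nums i 0)
          else dp1)
      (List.replicate j 0 ++ fAux ((nums.take N).drop j))
    = fAux (nums.take N) := by
  intro j
  induction j with
  | zero =>
    intro _
    rw [PySem.List.pyRange_neg_one_eq_nil (by omega)]
    simp
  | succ j ih =>
    intro hj
    have hjN : j < N := by omega
    have hcast : ((j+1 : Nat) : Int) - 1 = (j : Int) := by push_cast; ring
    set f := (fun (dp : List Int) (i : Int) =>
        let dp1 := PySem.List.pySetD dp i (PySem.List.pyGetD nums i 0)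
        if i == (N:Int) - 1 then dp1
        else
          if PySem.List.pyGetD dp1 i 0 < PySem.List.pyGetD dp1 (i + 1) 0 + PySem.List.pyGetD nums i 0 then
            PySem.List.pySetD dp1 i (PySem.List.pyGetD dp1 (i + 1) 0 + PySem.List.pyGetD nums i 0)
          else dp1) with hf
    rw [hcast, PySem.List.pyRange_neg_one_cons (by exact_mod_cast (by omega : (-1:Int) < (j:Int))), List.foldl_cons]
    have hjt : j < (nums.take N).length := by simp; omega
    have hdrop : (nums.take N).drop j = (nums.take N)[j] :: (nums.take N).drop (j+1) :=
      List.drop_eq_getElem_cons hjt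
    have hx : (nums.take N)[j] = nums.getD j 0 := by
      rw [List.getElem_take]
      exact (List.getD_eq_getElem nums 0 (by omega)).symm
    have hstep :
        f (List.replicate (j+1) 0 ++ fAux ((nums.take N).drop (j+1))) (j : Int)
        = List.replicate j 0 ++ fAux ((nums.take N).drop j) := by
      rw [hf]
      simp only []
      rw [List.replicate_succ' ]
      rw [List.append_assoc, List.singleton_append]
      set L := fAux ((nums.take N).drop (j+1)) with hL
      have h1 : PySem.List.pySetD (List.replicate j (0:Int) ++ 0 :: L) (j:Int) (PySem.List.pyGetD nums (j:Int) 0)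
          = List.replicate j 0 ++ nums.getD j 0 :: L := by
        simp only [PySem.List.pySetD_natCast, PySem.List.pyGetD_natCast, repl_set]
      rw [h1]
      by_cases hlast : j = N - 1
      · have : ((j:Int) == (N:Int) - 1) = true := by
          simp only [beq_iff_eq]; omega
        rw [this]
        simp only [if_true]
        have hdone : (nums.take N).drop (j+1) = [] := by
          apply List.drop_eq_nil_of_le; simp; omega
        rw [hdrop, hdone, hx]
        simp [fAux, hL, hdone]
      · have : ((j:Int) == (N:Int) - 1) = false := by
          simp only [beq_eq_false_iff_ne, ne_eq]; omega
        rw [this]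
        simp only [Bool.false_eq_true, if_false]
        have hne : (nums.take N).drop (j+1) ≠ [] := by
          simp only [ne_eq, List.drop_eq_nil_iff]; simp; omega
        have hLne : L ≠ [] := by
          rw [hL]
          cases hc : (nums.take N).drop (j+1) with
          | nil => exact absurd hc hne
          | cons a t => simp only [fAux]; cases fAux t <;> simp
        obtain ⟨y, r, hyr⟩ := List.exists_cons_of_ne_nil hLne
        rw [hyr]
        set x := nums.getD j 0 with hxd
        have g1 : PySem.List.pyGetD (List.replicate j 0 ++ x :: y :: r) (j:Int) 0 = x := by
          simp only [PySem.List.pyGetD_natCast, repl_getD]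
        have g2 : PySem.List.pyGetD (List.replicate j 0 ++ x :: y :: r) ((j:Int) + 1) 0 = y := by
          have : ((j:Int) + 1) = ((j+1 : Nat) : Int) := by push_cast; ring
          rw [this]
          simp only [PySem.List.pyGetD_natCast, repl_getD_succ]
          simp [List.getD]
        rw [g1, g2]
        have g3 : PySem.List.pyGetD nums (j:Int) 0 = x := by simp [hxd]
        rw [g3]
        have hfA : fAux ((nums.take N).drop j) = (max x (x + y)) :: y :: r := by
          rw [hdrop, hx]
          simp only [fAux]
          rw [← hL, hyr]
        rw [hfA]
        by_cases hc : x < y + x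
        · rw [if_pos hc]
          simp only [PySem.List.pySetD_natCast, repl_set]
          have : max x (x + y) = y + x := by omega
          rw [this]
        · rw [if_neg hc]
          have : max x (x + y) = x := by omega
          rw [this]
    rw [hstep]
    exact ih (by omega)

-- B's forward pass builds the prefix-sum table of nums.take N
theorem invP (nums : List Int) (N : Nat) (hN : N ≤ nums.length) :
    ∀ (j k : Nat), k + j = N →
    (PySem.List.pyRange (k:Int) (N:Int) 1).foldl
      (fun P t => P ++ [PySem.List.pyGetD P (-1) 0 + PySem.List.pyGetD nums t 0])
      ((List.range (k+1)).map (fun t => (nums.take t).sum))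
    = (List.range (N+1)).map (fun t => (nums.take t).sum) := by
  intro j
  induction j with
  | zero =>
    intro k hk
    rw [PySem.List.pyRange_one_eq_nil (by omega)]
    subst hk
    simp
  | succ j ih =>
    intro k hk
    rw [PySem.List.pyRange_one_cons (by exact_mod_cast (by omega : (k:Int) < (N:Int)))]
    rw [List.foldl_cons]
    have hstep : ((List.range (k+1)).map (fun t => (nums.take t).sum)) ++
        [PySem.List.pyGetD ((List.range (k+1)).map (fun t => (nums.take t).sum)) (-1) 0
          + PySem.List.pyGetD nums (k:Int) 0]
        = (List.range (k+1+1)).map (fun t => (nums.take t).sum) := by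
      rw [List.range_succ (n := k+1), List.map_append]
      congr 1
      rw [List.range_succ (n := k), List.map_append]
      simp only [List.map_cons, List.map_nil]
      rw [PySem.List.pyGetD_neg_one_append_singleton]
      simp only [PySem.List.pyGetD_natCast]
      rw [take_sum_succ nums k (by omega)]
    rw [hstep]
    have : ((k:Int) + 1) = ((k+1 : Nat) : Int) := by push_cast; ring
    rw [this]
    exact ih (k+1) (by omega)

-- B's backward pass, started after the first N-j iterations: the carried maximum is
-- prefix[j] + head of the DP of the remaining suffix, and the built list is that DP
theorem invB (nums : List Int) (N : Nat) (hN : N ≤ nums.length) :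
    ∀ (j : Nat), j ≤ N →
    (PySem.List.pyRange ((j:Int) - 1) (-1) (-1)).foldl
      (fun (st : Int × List Int) i =>
        let m := if PySem.List.pyGetD ((List.range (N+1)).map (fun t => (nums.take t).sum)) (i + 1) 0 > st.1 then
            PySem.List.pyGetD ((List.range (N+1)).map (fun t => (nums.take t).sum)) (i + 1) 0 else st.1
        (m, st.2 ++ [m - PySem.List.pyGetD ((List.range (N+1)).map (fun t => (nums.take t).sum)) i 0]))
      ((nums.take j).sum + (fAux ((nums.take N).drop j)).headD 0, (fAux ((nums.take N).drop j)).reverse)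
    = ((nums.take 0).sum + (fAux (nums.take N)).headD 0, (fAux (nums.take N)).reverse) := by
  intro j
  induction j with
  | zero =>
    intro _
    rw [PySem.List.pyRange_neg_one_eq_nil (by omega)]
    simp
  | succ j ih =>
    intro hj
    have hjN : j < N := by omega
    have hcast : ((j+1 : Nat) : Int) - 1 = (j : Int) := by push_cast; ring
    set f := (fun (st : Int × List Int) (i : Int) =>
        let m := if PySem.List.pyGetD ((List.range (N+1)).map (fun t => (nums.take t).sum)) (i + 1) 0 > st.1 then
            PySem.List.pyGetD ((List.range (N+1)).map (fun t => (nums.take t).sum)) (i + 1) 0 else st.1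
        (m, st.2 ++ [m - PySem.List.pyGetD ((List.range (N+1)).map (fun t => (nums.take t).sum)) i 0])) with hf
    rw [hcast, PySem.List.pyRange_neg_one_cons (by exact_mod_cast (by omega : (-1:Int) < (j:Int))), List.foldl_cons]
    have hjt : j < (nums.take N).length := by simp; omega
    have hdrop : (nums.take N).drop j = (nums.take N)[j] :: (nums.take N).drop (j+1) :=
      List.drop_eq_getElem_cons hjt
    have hx : (nums.take N)[j] = nums.getD j 0 := by
      rw [List.getElem_take]
      exact (List.getD_eq_getElem nums 0 (by omega)).symm
    have gP1 : PySem.List.pyGetD ((List.range (N+1)).map (fun t => (nums.take t).sum)) ((j:Int) + 1) 0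
        = (nums.take (j+1)).sum := by
      have : ((j:Int) + 1) = ((j+1 : Nat) : Int) := by push_cast; ring
      rw [this]
      simp only [PySem.List.pyGetD_natCast]
      exact pl_getD nums N (j+1) (by omega)
    have gP0 : PySem.List.pyGetD ((List.range (N+1)).map (fun t => (nums.take t).sum)) ((j:Int)) 0
        = (nums.take j).sum := by
      simp only [PySem.List.pyGetD_natCast]
      exact pl_getD nums N j (by omega)
    have hsum : (nums.take (j+1)).sum = (nums.take j).sum + nums.getD j 0 :=
      take_sum_succ nums j (by omega)
    have hstep :
        f ((nums.take (j+1)).sum + (fAux ((nums.take N).drop (j+1))).headD 0, (fAux ((nums.take N).drop (j+1))).reverse) (j : Int)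
        = ((nums.take j).sum + (fAux ((nums.take N).drop j)).headD 0, (fAux ((nums.take N).drop j)).reverse) := by
      rw [hf]
      simp only []
      rw [gP1, gP0]
      cases hLc : fAux ((nums.take N).drop (j+1)) with
      | nil =>
        have hfA : fAux ((nums.take N).drop j) = [nums.getD j 0] := by
          rw [hdrop, hx]; simp only [fAux]; rw [hLc]
        rw [hfA]
        simp only [List.headD_nil, List.headD_cons, add_zero, List.reverse_nil,
          List.reverse_cons, List.nil_append]
        rw [if_neg (by omega)]
        simp only [Prod.mk.injEq, List.cons.injEq, and_true]
        refine ⟨by omega, by omega⟩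
      | cons y r =>
        have hfA : fAux ((nums.take N).drop j) =
            max (nums.getD j 0) (nums.getD j 0 + y) :: y :: r := by
          rw [hdrop, hx]; simp only [fAux]; rw [hLc]
        rw [hfA]
        simp only [List.headD_cons, List.reverse_cons, List.append_assoc,
          List.append_cancel_left_eq, Prod.mk.injEq, List.cons.injEq, and_true,
          List.singleton_append]
        by_cases hc : (nums.take (j+1)).sum > (nums.take (j+1)).sum + y
        · rw [if_pos hc]
          have hmax : max (nums.getD j 0) (nums.getD j 0 + y) = nums.getD j 0 := by omega
          rw [hmax]
          refine ⟨by omega, ⟨trivial, by omega⟩⟩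
        · rw [if_neg hc]
          have hmax : max (nums.getD j 0) (nums.getD j 0 + y) = nums.getD j 0 + y := by omega
          rw [hmax]
          refine ⟨by omega, ⟨trivial, by omega⟩⟩
    rw [hstep]
    exact ih (by omega)

theorem portA_eq (n : Int) (nums : List Int) (hn : 0 < n) (hpre : n ≤ (nums.length : Int)) :
    get_dp_r n nums = fAux (nums.take n.toNat) := by
  set N := n.toNat with hNdef
  have hn' : n = (N : Int) := by omega
  have hN : N ≤ nums.length := by omega
  unfold get_dp_r
  rw [hn']
  have h := invA nums N hN N le_rfl
  have h0 : (nums.take N).drop N = [] := List.drop_eq_nil_of_le (by simp)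
  rw [h0] at h
  simp only [fAux, List.append_nil] at h
  simpa using h

theorem portB_eq (n : Int) (nums : List Int) (hn : 0 < n) (hpre : n ≤ (nums.length : Int)) :
    get_dp_r_alt n nums = fAux (nums.take n.toNat) := by
  set N := n.toNat with hNdef
  have hn' : n = (N : Int) := by omega
  have hN : N ≤ nums.length := by omega
  unfold get_dp_r_alt
  rw [if_neg (by omega), hn']
  simp only []
  have hP : (PySem.List.pyRange 0 (N:Int) 1).foldl
      (fun P k => P ++ [PySem.List.pyGetD P (-1) 0 + PySem.List.pyGetD nums k 0]) [0]
      = (List.range (N+1)).map (fun t => (nums.take t).sum) := by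
    have h := invP nums N hN N 0 (by omega)
    simpa using h
  rw [hP]
  have hinit : PySem.List.pyGetD ((List.range (N+1)).map (fun t => (nums.take t).sum)) (N:Int) 0
      = (nums.take N).sum := by
    simp only [PySem.List.pyGetD_natCast]
    exact pl_getD nums N N le_rfl
  rw [hinit]
  have h := invB nums N hN N le_rfl
  have h0 : (nums.take N).drop N = [] := List.drop_eq_nil_of_le (by simp)
  rw [h0] at h
  simp only [fAux, List.headD_nil, add_zero, List.reverse_nil] at h
  rw [h, PySem.List.slice?_none_none_neg_one]
  simp

-- ===== VERDICT (by name: the statement is the Claim_ definition above) =====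
theorem get_dp_r_spec : Claim_equal_get_dp_r := by
  intro n nums _ hpre
  unfold Pre_get_dp_r at hpre
  unfold Spec_get_dp_r
  by_cases hn : n ≤ 0
  · have hA : get_dp_r n nums = [] := by
      unfold get_dp_r
      rw [PySem.List.pyRange_neg_one_eq_nil (by omega)]
      simp only [List.foldl_nil]
      rw [Int.toNat_of_nonpos hn]
      rfl
    have hB : get_dp_r_alt n nums = [] := by
      unfold get_dp_r_alt
      rw [if_pos hn]
    rw [hA, hB]
  · rw [portA_eq n nums (by omega) hpre, portB_eq n nums (by omega) hpre]
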